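-- pv_equiv track=rewrite | github.com/darkarp/algorename | run.py | shift_filename
-- ===== SOURCE A (Python) =====
-- def shift_filename(filename: str) -> str:
--     """Shift each alphabetic character in a filename to the left by 1.
--
--     Args:
--         filename (str): The original filename.
--
--     Returns:
--         str: The shifted filename.
--     """
--     shifted_name = ""
--     for char in filename:
--         if char.isalpha():
--             shifted_char = chr(ord(char) - 1) if char.lower() != 'a' else 'z' if char.islower() else 'Z'
--         else:
--             shifted_char = char
--         shifted_name += shifted_char
--     return shifted_name
-- ===== SOURCE B (Python) =====
-- _LOWER = "abcdefghijklmnopqrstuvwxyz"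
-- _UPPER = _LOWER.upper()
-- _TABLE = str.maketrans(_LOWER + _UPPER,
--                        _LOWER[-1] + _LOWER[:-1] + _UPPER[-1] + _UPPER[:-1])
--
--
-- def shift_filename(filename: str) -> str:
--     """Shift each alphabetic character in a filename to the left by 1."""
--     return filename.translate(_TABLE)
-- ===== Notes on version B (the rewrite author's own statement) =====
-- stated objective: idiomatic
-- what changed: Replaces the per-character branching loop (isalpha test, conditional chr/ord arithmetic, string concatenation) with a fixed 52-entry translation table built once via str.maketrans and a single C-level filename.translate(table) call.
import Mathlib
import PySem

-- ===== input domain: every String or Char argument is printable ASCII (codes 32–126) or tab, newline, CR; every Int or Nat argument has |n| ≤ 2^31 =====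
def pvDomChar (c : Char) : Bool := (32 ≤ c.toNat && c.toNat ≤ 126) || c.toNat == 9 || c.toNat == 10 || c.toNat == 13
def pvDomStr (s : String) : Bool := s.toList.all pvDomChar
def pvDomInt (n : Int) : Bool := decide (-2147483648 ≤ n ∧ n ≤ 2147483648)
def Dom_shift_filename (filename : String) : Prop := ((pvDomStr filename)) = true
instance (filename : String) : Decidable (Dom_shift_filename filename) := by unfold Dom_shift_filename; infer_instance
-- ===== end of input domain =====

-- B replaces A's per-character branching loop with a fixed 52-letter translation
-- table built once and a single table-driven map over the string (idiomatic).


-- ===== PORT A =====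
-- one char of A's loop body: the isalpha test and the conditional shift
def shiftCharA (c : Char) : Char :=
  if PySem.Chars.isalpha c then
    if PySem.Chars.lowerChar c ≠ 'a' then Char.ofNat (c.toNat - 1)
    else if PySem.Chars.islower c then 'z' else 'Z'
  else c

def shift_filename (filename : String) : String :=
  String.ofList (filename.toList.foldl (fun acc c => acc ++ [shiftCharA c]) [])

-- ===== PORT B =====
def altLower : List Char := "abcdefghijklmnopqrstuvwxyz".toList
def altUpper : List Char := PySem.Chars.upper altLower
-- str.maketrans(src, dst): a dict built from the zipped character pairs
def altTable : PySem.Dict Char Char :=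
  PySem.Dict.ofList ((altLower ++ altUpper).zip
    (altLower.getLast! :: altLower.dropLast ++ altUpper.getLast! :: altUpper.dropLast))

-- str.translate: map each char through the table, chars absent are unchanged
def shift_filename_alt (filename : String) : String :=
  String.ofList (filename.toList.map (fun c => altTable.getD c c))

-- ===== PRECONDITION & SPEC =====
def Spec_shift_filename (filename : String) (out : String) : Prop := out = shift_filename_alt filename
instance (filename : String) (out : String) : Decidable (Spec_shift_filename filename out) := by unfold Spec_shift_filename; infer_instance

-- ===== CLAIM (what is proved, stated in full; the proofs are below) =====
def Claim_equal_shift_filename : Prop := ∀ (filename : String), Dom_shift_filename filename → Spec_shift_filename filename (shift_filename filename)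

-- ===== LEMMAS AND PROOFS =====

-- pointwise agreement on every character of the domain, checked by the kernel
set_option maxRecDepth 40000 in
theorem shiftCharA_eq_table (n : Nat) (h : n < 127) :
    shiftCharA (Char.ofNat n) = altTable.getD (Char.ofNat n) (Char.ofNat n) := by
  revert n; decide

theorem shiftCharA_eq_table' (c : Char) (h : pvDomChar c = true) :
    shiftCharA c = altTable.getD c c := by
  have hn : c.toNat < 127 := by
    simp only [pvDomChar, Bool.or_eq_true, Bool.and_eq_true, decide_eq_true_eq, beq_iff_eq] at h
    omega
  have := shiftCharA_eq_table c.toNat hn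
  rwa [Char.ofNat_toNat] at this

-- ===== VERDICT (by name: the statement is the Claim_ definition above) =====
set_option maxRecDepth 40000 in
theorem shift_filename_spec : Claim_equal_shift_filename := by
  intro filename hdom
  unfold Spec_shift_filename shift_filename shift_filename_alt
  rw [PySem.List.foldl_append_singleton_eq_map]
  congr 1
  apply List.map_congr_left
  intro c hc
  exact shiftCharA_eq_table' c (by
    have := List.all_eq_true.mp hdom c hc
    exact this)
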